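-- pv_equiv track=rewrite | github.com/sahilkur36/apeGmsh | src/apeGmsh/results/readers/_mpco_spring_io.py | _spring_root_and_index
-- ===== SOURCE A (Python) =====
-- def _spring_root_and_index(canonical: str) -> tuple[str, int] | None:
--     """Split a spring canonical into ``(root, spring_index)``.
--
--     The bare root ``"spring_force"`` (no ``_<n>`` suffix) maps to
--     spring index 0 — i.e. it pulls column 0 of *every* matched bucket,
--     not just buckets where ``n_springs == 1``.  In a model that mixes
--     1-spring and N-spring ZeroLength elements, ``spring_force`` will
--     therefore return rows for both groups: the (only) spring of the
--     1-spring elements, plus spring 0 of the N-spring elements.  Use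
--     ``spring_force_<n>`` (or ``ids=`` filtering) when you need to
--     target a specific subset.
--
--     Examples
--     --------
--     ``"spring_force_0"``       → ``("spring_force", 0)``
--     ``"spring_force_3"``       → ``("spring_force", 3)``
--     ``"spring_deformation_1"`` → ``("spring_deformation", 1)``
--     ``"spring_force"``         → ``("spring_force", 0)``  (bare root → index 0)
--     ``"stress_xx"``            → ``None``
--     """
--     for root in ("spring_force", "spring_deformation"):
--         if canonical == root:
--             return root, 0
--         if canonical.startswith(root + "_"):
--             suffix = canonical[len(root) + 1:]
--             if suffix.isdigit():
--                 return root, int(suffix)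
--     return None
-- ===== SOURCE B (Python) =====
-- _SPRING_ROOTS = frozenset({"spring_force", "spring_deformation"})
--
--
-- def _spring_root_and_index(canonical: str):
--     """Parse a spring canonical into (root, index) via one rpartition."""
--     if canonical in _SPRING_ROOTS:
--         return canonical, 0
--     root, sep, suffix = canonical.rpartition("_")
--     if sep and suffix.isdigit() and root in _SPRING_ROOTS:
--         return root, int(suffix)
--     return None
-- ===== Notes on version B (the rewrite author's own statement) =====
-- stated objective: simpler
-- what changed: Replaces A's loop over candidate roots with startswith/slice per root by a single rpartition at the last underscore plus one set-membership test of the root (bare roots handled first by membership).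
import Mathlib
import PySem

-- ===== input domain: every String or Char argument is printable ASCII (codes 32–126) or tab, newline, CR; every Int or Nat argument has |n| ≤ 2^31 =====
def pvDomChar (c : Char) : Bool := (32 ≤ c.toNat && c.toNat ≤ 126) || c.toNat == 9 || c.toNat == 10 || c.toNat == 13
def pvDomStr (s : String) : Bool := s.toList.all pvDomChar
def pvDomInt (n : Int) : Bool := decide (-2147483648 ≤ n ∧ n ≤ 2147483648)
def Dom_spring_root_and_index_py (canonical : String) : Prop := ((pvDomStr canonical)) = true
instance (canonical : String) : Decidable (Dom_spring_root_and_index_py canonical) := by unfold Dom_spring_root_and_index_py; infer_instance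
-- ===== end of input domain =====

-- B re-implements the parse with one rpartition at the last underscore plus set membership,
-- instead of A's loop over candidate roots with startswith/slice; objective: simpler.

-- ===== PORT A =====
-- literal port of A's for-loop over the tuple of roots
def pvALoop (canonical : String) : List String → Option (String × Int)
  | [] => none
  | root :: rest =>
    if canonical == root then some (root, 0)
    else
      if PySem.Str.startswith canonical (root ++ "_") then
        let suffix := PySem.Str.slice canonical (some (PySem.Str.len root + 1)) none
        if PySem.Str.strIsdigit suffix then
          -- int(suffix): the suffix is a nonempty ASCII digit string, so Python's int() returns;
          -- the `none` arm is unreachable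
          match PySem.Int.ofStr? suffix with
          | some n => some (root, n)
          | none => none
        else pvALoop canonical rest
      else pvALoop canonical rest

def spring_root_and_index_py (canonical : String) : Option (String × Int) :=
  pvALoop canonical ["spring_force", "spring_deformation"]

-- ===== PORT B =====
-- hand port of str.rpartition("_") (PySem has no rpartition): split at the LAST underscore,
-- `none` when there is no underscore (Python's ("", "", s) with empty sep); exact for this use
def pvRpartUnd : List Char → Option (List Char × List Char)
  | [] => none
  | c :: rest =>
    match pvRpartUnd rest with
    | some (a, b) => some (c :: a, b)
    | none => if c = '_' then some ([], rest) else none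

def pvRoots : PySem.Set String := PySem.Set.ofList ["spring_force", "spring_deformation"]

def spring_root_and_index_py_alt (canonical : String) : Option (String × Int) :=
  if pvRoots.contains canonical then some (canonical, 0)
  else
    match pvRpartUnd canonical.toList with
    | none => none
    | some (a, b) =>
      if PySem.Chars.strIsdigit b && pvRoots.contains (String.ofList a) then
        -- int(suffix): nonempty ASCII digit string, the `none` arm is unreachable
        match PySem.Int.ofChars? b with
        | some n => some (String.ofList a, n)
        | none => none
      else none

-- ===== PRECONDITION & SPEC =====
def Spec_spring_root_and_index_py (canonical : String) (out : Option (String × Int)) : Prop := out = spring_root_and_index_py_alt canonical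
instance (canonical : String) (out : Option (String × Int)) : Decidable (Spec_spring_root_and_index_py canonical out) := by unfold Spec_spring_root_and_index_py; infer_instance

-- ===== CLAIM (what is proved, stated in full; the proofs are below) =====
def Claim_equal_spring_root_and_index_py : Prop := ∀ (canonical : String), Dom_spring_root_and_index_py canonical → Spec_spring_root_and_index_py canonical (spring_root_and_index_py canonical)

-- ===== LEMMAS AND PROOFS =====

theorem pvRpartUnd_none_iff (cs : List Char) : pvRpartUnd cs = none ↔ '_' ∉ cs := by
  induction cs with
  | nil => simp [pvRpartUnd]
  | cons c rest ih =>
    simp only [pvRpartUnd]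
    cases h : pvRpartUnd rest with
    | some p => simp_all
    | none =>
      rw [h] at ih
      by_cases hc : c = '_' <;> simp_all [eq_comm]

theorem pvRpartUnd_sound (cs : List Char) : ∀ a b, pvRpartUnd cs = some (a, b) →
    cs = a ++ '_' :: b ∧ '_' ∉ b := by
  induction cs with
  | nil => intro a b h; simp [pvRpartUnd] at h
  | cons c rest ih =>
    intro a b h
    simp only [pvRpartUnd] at h
    cases hr : pvRpartUnd rest with
    | some p =>
      obtain ⟨a', b'⟩ := p
      rw [hr] at h
      simp only [Option.some.injEq, Prod.mk.injEq] at h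
      obtain ⟨ha, hb⟩ := h
      obtain ⟨h1, h2⟩ := ih a' b' hr
      subst ha hb
      simp [h1, h2]
    | none =>
      rw [hr] at h
      split_ifs at h with hc
      simp only [Option.some.injEq, Prod.mk.injEq] at h
      obtain ⟨ha, hb⟩ := h
      refine ⟨by simp [← ha, ← hb, hc], ?_⟩
      rw [← hb]; exact (pvRpartUnd_none_iff rest).mp hr

theorem pvRpartUnd_last (a b : List Char) (hb : '_' ∉ b) :
    pvRpartUnd (a ++ '_' :: b) = some (a, b) := by
  induction a with
  | nil => simp [pvRpartUnd, (pvRpartUnd_none_iff b).mpr hb]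
  | cons c a ih => simp [pvRpartUnd, ih]

theorem pvRoots_contains (s : String) :
    pvRoots.contains s = (decide (s = "spring_force") || decide (s = "spring_deformation")) := by
  simp [pvRoots, PySem.Set.ofList, PySem.Set.contains, PySem.Set.add]

theorem pvDigits_no_und (b : List Char) (h : PySem.Chars.strIsdigit b = true) : '_' ∉ b := by
  simp only [PySem.Chars.strIsdigit, Bool.and_eq_true, List.all_eq_true] at h
  intro hm
  have := h.2 '_' hm
  revert this
  decide

theorem pvStartswith_decomp (s r : String) (hs : PySem.Str.startswith s r = true) :
    s.toList = r.toList ++ s.toList.drop r.toList.length := by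
  rw [PySem.Str.startswith_eq] at hs
  obtain ⟨t, ht⟩ := (PySem.Chars.startswith_iff _ _).mp hs
  rw [← ht]
  simp

theorem pvSuffix_toList (s r : String) (b : List Char)
    (hcs : s.toList = r.toList ++ '_' :: b) :
    (PySem.Str.slice s (some (PySem.Str.len r + 1)) none).toList = b := by
  rw [PySem.Str.toList_slice, PySem.Chars.slice_eq_listSlice, hcs]
  have hlen : PySem.Str.len r + 1 = ((r.toList.length + 1 : Nat) : Int) := by
    simp [PySem.Str.len_eq]
  rw [hlen, PySem.List.slice_from_natCast]
  rw [show r.toList ++ '_' :: b = (r.toList ++ ['_']) ++ b by simp]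
  rw [show r.toList.length + 1 = (r.toList ++ ['_']).length by simp]
  exact List.drop_left

-- one loop iteration of A that fails both tests falls through to the rest
theorem pvALoop_cons_skip (canonical root : String) (rest : List String)
    (hne : canonical ≠ root)
    (hfail : PySem.Str.startswith canonical (root ++ "_") = false ∨
      PySem.Str.strIsdigit (PySem.Str.slice canonical (some (PySem.Str.len root + 1)) none) = false) :
    pvALoop canonical (root :: rest) = pvALoop canonical rest := by
  have hb : (canonical == root) = false := beq_eq_false_iff_ne.mpr hne
  rcases hfail with h | h
  · simp only [pvALoop, hb, Bool.false_eq_true, if_false, h]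
  · cases hsw : PySem.Str.startswith canonical (root ++ "_") with
    | false => simp only [pvALoop, hb, Bool.false_eq_true, if_false, hsw]
    | true => simp only [pvALoop, hb, Bool.false_eq_true, if_false, hsw, if_true, h]

-- if A's startswith + isdigit tests succeed for root r, the rpartition split is (r, suffix)
theorem pvA_root (canonical r : String) (a b : List Char)
    (hr : pvRpartUnd canonical.toList = some (a, b))
    (hsw : PySem.Str.startswith canonical (r ++ "_") = true)
    (hd : PySem.Str.strIsdigit (PySem.Str.slice canonical (some (PySem.Str.len r + 1)) none) = true) :
    a = r.toList ∧ PySem.Chars.strIsdigit b = true ∧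
      PySem.Int.ofStr? (PySem.Str.slice canonical (some (PySem.Str.len r + 1)) none) =
        PySem.Int.ofChars? b := by
  have hcs : canonical.toList = r.toList ++ '_' :: canonical.toList.drop (r ++ "_").toList.length := by
    conv_lhs => rw [pvStartswith_decomp canonical (r ++ "_") hsw]
    simp
  have hsuf := pvSuffix_toList canonical r _ hcs
  rw [PySem.Str.strIsdigit_eq, hsuf] at hd
  have hlast := pvRpartUnd_last r.toList _ (pvDigits_no_und _ hd)
  rw [← hcs] at hlast
  rw [hlast] at hr
  simp only [Option.some.injEq, Prod.mk.injEq] at hr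
  obtain ⟨ha, hb⟩ := hr
  subst ha hb
  refine ⟨rfl, hd, ?_⟩
  simp only [PySem.Int.ofStr?]
  rw [hsuf]

-- conversely, if the rpartition split is (r, digits) then A's tests for r succeed
theorem pvB_root (canonical r : String) (a b : List Char)
    (hcs : canonical.toList = a ++ '_' :: b)
    (ha : String.ofList a = r) (hd : PySem.Chars.strIsdigit b = true) :
    PySem.Str.startswith canonical (r ++ "_") = true ∧
      PySem.Str.strIsdigit (PySem.Str.slice canonical (some (PySem.Str.len r + 1)) none) = true := by
  have haL : a = r.toList := by rw [← ha]; simp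
  subst haL
  constructor
  · rw [PySem.Str.startswith_eq]
    apply (PySem.Chars.startswith_iff _ _).mpr
    exact ⟨b, by rw [hcs]; simp⟩
  · rw [PySem.Str.strIsdigit_eq, pvSuffix_toList canonical r b hcs, hd]

-- ===== VERDICT (by name: the statement is the Claim_ definition above) =====
theorem spring_root_and_index_py_spec : Claim_equal_spring_root_and_index_py := by
  intro canonical _
  unfold Spec_spring_root_and_index_py
  by_cases h1 : canonical = "spring_force"
  · subst h1; decide
  by_cases h2 : canonical = "spring_deformation"
  · subst h2; decide
  have hc : pvRoots.contains canonical = false := by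
    rw [pvRoots_contains]; simp [h1, h2]
  cases hr : pvRpartUnd canonical.toList with
  | none =>
    have hnu : '_' ∉ canonical.toList := (pvRpartUnd_none_iff _).mp hr
    have hsw : ∀ r : String, PySem.Str.startswith canonical (r ++ "_") = false := by
      intro r
      cases hb : PySem.Str.startswith canonical (r ++ "_") with
      | false => rfl
      | true =>
        exfalso
        rw [PySem.Str.startswith_eq] at hb
        have hp := (PySem.Chars.startswith_iff _ _).mp hb
        exact hnu (hp.subset (by simp))
    simp only [spring_root_and_index_py]
    rw [pvALoop_cons_skip canonical _ _ h1 (Or.inl (hsw _)),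
        pvALoop_cons_skip canonical _ _ h2 (Or.inl (hsw _))]
    simp [pvALoop, spring_root_and_index_py_alt, hr, pvRoots, PySem.Set.ofList, PySem.Set.add, h1, h2]
  | some p =>
    obtain ⟨a, b⟩ := p
    obtain ⟨hcs, hnb⟩ := pvRpartUnd_sound _ a b hr
    by_cases hhit1 : PySem.Str.startswith canonical ("spring_force" ++ "_") = true ∧
        PySem.Str.strIsdigit (PySem.Str.slice canonical (some (PySem.Str.len "spring_force" + 1)) none) = true
    case pos =>
      obtain ⟨hsw1, hd1⟩ := hhit1
      obtain ⟨ha, hdb, hof⟩ := pvA_root canonical "spring_force" a b hr hsw1 hd1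
      subst ha
      simp only [spring_root_and_index_py, pvALoop, beq_eq_false_iff_ne.mpr h1,
        Bool.false_eq_true, if_false, hsw1, if_true, hd1, hof,
        spring_root_and_index_py_alt, hc, hr, hdb, pvRoots_contains]
      simp
    case neg =>
      have hskip1 : PySem.Str.startswith canonical ("spring_force" ++ "_") = false ∨
          PySem.Str.strIsdigit (PySem.Str.slice canonical (some (PySem.Str.len "spring_force" + 1)) none) = false := by
        rcases Decidable.not_and_iff_not_or_not.mp hhit1 with h | h
        · exact Or.inl (Bool.eq_false_iff.mpr h)
        · exact Or.inr (Bool.eq_false_iff.mpr h)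
      by_cases hhit2 : PySem.Str.startswith canonical ("spring_deformation" ++ "_") = true ∧
          PySem.Str.strIsdigit (PySem.Str.slice canonical (some (PySem.Str.len "spring_deformation" + 1)) none) = true
      case pos =>
        obtain ⟨hsw2, hd2⟩ := hhit2
        obtain ⟨ha, hdb, hof⟩ := pvA_root canonical "spring_deformation" a b hr hsw2 hd2
        subst ha
        simp only [spring_root_and_index_py]
        rw [pvALoop_cons_skip canonical _ _ h1 hskip1]
        simp only [pvALoop, beq_eq_false_iff_ne.mpr h2,
          Bool.false_eq_true, if_false, hsw2, if_true, hd2, hof,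
          spring_root_and_index_py_alt, hc, hr, hdb, pvRoots_contains]
        simp
      case neg =>
        have hskip2 : PySem.Str.startswith canonical ("spring_deformation" ++ "_") = false ∨
            PySem.Str.strIsdigit (PySem.Str.slice canonical (some (PySem.Str.len "spring_deformation" + 1)) none) = false := by
          rcases Decidable.not_and_iff_not_or_not.mp hhit2 with h | h
          · exact Or.inl (Bool.eq_false_iff.mpr h)
          · exact Or.inr (Bool.eq_false_iff.mpr h)
        have hcond : (PySem.Chars.strIsdigit b && pvRoots.contains (String.ofList a)) = false := by
          cases hdb : PySem.Chars.strIsdigit b with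
          | false => simp
          | true =>
            rw [pvRoots_contains]
            by_cases ha1 : String.ofList a = "spring_force"
            · obtain ⟨t1, t2⟩ := pvB_root canonical "spring_force" a b hcs ha1 hdb
              rcases hskip1 with h | h
              · rw [t1] at h; exact absurd h (by simp)
              · rw [t2] at h; exact absurd h (by simp)
            by_cases ha2 : String.ofList a = "spring_deformation"
            · obtain ⟨t1, t2⟩ := pvB_root canonical "spring_deformation" a b hcs ha2 hdb
              rcases hskip2 with h | h
              · rw [t1] at h; exact absurd h (by simp)
              · rw [t2] at h; exact absurd h (by simp)
            simp [ha1, ha2]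
        simp only [spring_root_and_index_py]
        rw [pvALoop_cons_skip canonical _ _ h1 hskip1,
            pvALoop_cons_skip canonical _ _ h2 hskip2]
        simp only [pvALoop, spring_root_and_index_py_alt, hc, Bool.false_eq_true, if_false, hr,
          hcond]
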